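-- pv_equiv track=rewrite | github.com/snehra0224/statistical_ema | makesets.py | setSize2teCV
-- ===== SOURCE A (Python) =====
-- SETSIZE=460
--
-- def setSize2teCV(partition):
-- 	teNumbers = []
-- 	for i in range(0, SETSIZE):
-- 		teNumbers.append(0)
-- 	i = 0
-- 	for j in range(1, SETSIZE+1):
-- 		if(j%5==partition):
-- 			teNumbers[i] = j
-- 			i+=1
-- 	return teNumbers
-- ===== SOURCE B (Python) =====
-- SETSIZE = 460
--
-- def setSize2teCV(partition):
--     if partition == 0:
--         nums = list(range(5, SETSIZE + 1, 5))
--     elif partition in (1, 2, 3, 4):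
--         nums = list(range(partition, SETSIZE + 1, 5))
--     else:
--         nums = []
--     return nums + [0] * (SETSIZE - len(nums))
-- ===== Notes on version B (the rewrite author's own statement) =====
-- stated objective: idiomatic
-- what changed: B emits the matching multiples directly as an arithmetic progression (range with step 5) and pads with zeros, instead of allocating a zero list of size SETSIZE and scanning every integer with a modulo test.
import Mathlib
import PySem

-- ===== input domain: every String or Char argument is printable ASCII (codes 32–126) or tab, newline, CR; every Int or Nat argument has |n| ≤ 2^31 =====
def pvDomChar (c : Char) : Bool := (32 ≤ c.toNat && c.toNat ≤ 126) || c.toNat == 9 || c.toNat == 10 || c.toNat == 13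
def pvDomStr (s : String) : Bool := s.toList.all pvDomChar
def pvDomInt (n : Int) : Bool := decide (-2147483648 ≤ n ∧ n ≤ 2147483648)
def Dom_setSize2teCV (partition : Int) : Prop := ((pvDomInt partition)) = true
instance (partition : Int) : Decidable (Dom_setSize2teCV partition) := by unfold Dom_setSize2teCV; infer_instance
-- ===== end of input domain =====

-- B builds the matching numbers directly as an arithmetic progression (step 5) and pads with
-- zeros, instead of A's allocate-460-zeros-then-scan-all-460-integers-with-a-modulo-test.

-- ===== PORT A =====
-- one step of A's second loop: state (teNumbers, i); teNumbers[i] = j uses List.set with i.toNat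
-- (i is only ever 0 ≤ i ≤ number of matches < 460, so this is exact for Python's in-range assignment)
def stepA (partition : Int) (st : List Int × Int) (j : Int) : List Int × Int :=
  if PySem.Int.mod j 5 == partition then (st.1.set st.2.toNat j, st.2 + 1) else st

def setSize2teCV (partition : Int) : List Int :=
  ((PySem.List.pyRange 1 461 1).foldl (stepA partition)
    ((PySem.List.pyRange 0 460 1).foldl (fun acc _ => acc ++ [0]) [], 0)).1

-- ===== PORT B =====
def setSize2teCV_alt (partition : Int) : List Int :=
  let nums : List Int :=
    if partition == 0 then PySem.List.pyRange 5 461 5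
    else if partition == 1 || partition == 2 || partition == 3 || partition == 4 then
      PySem.List.pyRange partition 461 5
    else []
  nums ++ List.replicate (460 - nums.length) 0

-- ===== PRECONDITION & SPEC =====
def Spec_setSize2teCV (partition : Int) (out : List Int) : Prop := out = setSize2teCV_alt partition
instance (partition : Int) (out : List Int) : Decidable (Spec_setSize2teCV partition out) := by unfold Spec_setSize2teCV; infer_instance

-- ===== CLAIM (what is proved, stated in full; the proofs are below) =====
def Claim_equal_setSize2teCV : Prop := ∀ (partition : Int), Dom_setSize2teCV partition → Spec_setSize2teCV partition (setSize2teCV partition)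

-- ===== LEMMAS AND PROOFS =====
set_option maxRecDepth 4000

-- if the modulo test never fires, A's second loop leaves its state untouched
theorem foldl_stepA_id (p : Int) (l : List Int) (st : List Int × Int)
    (h : ∀ j ∈ l, PySem.Int.mod j 5 ≠ p) : l.foldl (stepA p) st = st := by
  induction l generalizing st with
  | nil => rfl
  | cons x xs ih =>
    have hx : (PySem.Int.mod x 5 == p) = false := by
      simpa using h x List.mem_cons_self
    simp only [List.foldl_cons, stepA, hx, Bool.false_eq_true, if_false]
    exact ih st (fun j hj => h j (List.mem_cons_of_mem _ hj))

theorem mod5_bounds (j : Int) : 0 ≤ PySem.Int.mod j 5 ∧ PySem.Int.mod j 5 < 5 := by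
  rw [PySem.Int.mod_eq_emod_of_pos (by norm_num)]
  exact ⟨Int.emod_nonneg j (by norm_num), Int.emod_lt_of_pos j (by norm_num)⟩

theorem outside_case (p : Int) (hp : p < 0 ∨ 5 ≤ p) :
    setSize2teCV p = setSize2teCV_alt p := by
  unfold setSize2teCV
  rw [foldl_stepA_id p _ _ (fun j _ => by
    have := mod5_bounds j; omega)]
  have hb : setSize2teCV_alt p = List.replicate 460 0 := by
    unfold setSize2teCV_alt
    have h0 : (p == 0) = false := by simp; omega
    have h1 : (p == 1 || p == 2 || p == 3 || p == 4) = false := by simp; omega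
    simp [h0, h1]
  rw [hb]
  decide

-- ===== VERDICT (by name: the statement is the Claim_ definition above) =====
theorem setSize2teCV_spec : Claim_equal_setSize2teCV := by
  intro p _
  unfold Spec_setSize2teCV
  rcases lt_or_ge p 0 with h | h
  · exact outside_case p (Or.inl h)
  rcases lt_or_ge p 5 with h5 | h5
  · interval_cases p <;> decide
  · exact outside_case p (Or.inr h5)
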